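-- pv_equiv track=rewrite | github.com/cadet6465/ghpr | my_devider.py | _gen_class
-- ===== SOURCE A (Python) =====
-- def _gen_class(num_inst):
--     class_list = []
--     for i in range(num_inst):
--         if i % 2 == 0:
--             class_list.append(1)
--         else :
--             class_list.append(0)
--     return class_list
-- ===== SOURCE B (Python) =====
-- def _gen_class(num_inst):
--     return ([1, 0] * ((num_inst + 1) // 2))[:num_inst]
-- ===== Notes on version B (the rewrite author's own statement) =====
-- stated objective: simpler
-- what changed: Replaces the index loop with its modulo branch by replicating the two-element block [1,0] enough times and truncating with a slice; no loop or conditional remains.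
import Mathlib
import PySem

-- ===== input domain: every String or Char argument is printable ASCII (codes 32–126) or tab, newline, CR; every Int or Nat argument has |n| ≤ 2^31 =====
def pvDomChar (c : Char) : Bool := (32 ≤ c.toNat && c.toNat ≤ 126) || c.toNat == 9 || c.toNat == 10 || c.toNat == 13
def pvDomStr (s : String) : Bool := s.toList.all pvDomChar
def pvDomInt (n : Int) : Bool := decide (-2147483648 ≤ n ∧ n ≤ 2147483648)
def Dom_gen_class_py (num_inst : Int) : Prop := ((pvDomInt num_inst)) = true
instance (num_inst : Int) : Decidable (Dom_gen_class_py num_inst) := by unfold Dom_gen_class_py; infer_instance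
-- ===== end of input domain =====

-- B replaces A's index loop and modulo branch by replicating the block [1,0] and slicing to length (simpler; same cost).


-- ===== PORT A =====
def gen_class_py (num_inst : Int) : List Int :=
  (PySem.List.pyRange 0 num_inst 1).foldl
    (fun class_list i => if PySem.Int.mod i 2 = 0 then class_list ++ [1] else class_list ++ [0]) []

-- ===== PORT B =====
def gen_class_py_alt (num_inst : Int) : List Int :=
  PySem.List.slice ((List.replicate ((PySem.Int.floordiv (num_inst + 1) 2).toNat) ([1, 0] : List Int)).flatten)
    none (some num_inst)

-- ===== PRECONDITION & SPEC =====
def Spec_gen_class_py (num_inst : Int) (out : List Int) : Prop := out = gen_class_py_alt num_inst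
instance (num_inst : Int) (out : List Int) : Decidable (Spec_gen_class_py num_inst out) := by unfold Spec_gen_class_py; infer_instance

-- ===== CLAIM (what is proved, stated in full; the proofs are below) =====
def Claim_equal_gen_class_py : Prop := ∀ (num_inst : Int), Dom_gen_class_py num_inst → Spec_gen_class_py num_inst (gen_class_py num_inst)

-- ===== LEMMAS AND PROOFS =====

def pvAlt (k : Nat) : Int := if k % 2 = 0 then 1 else 0

lemma pvA_closed (m : Nat) :
    gen_class_py (m : Int) = (List.range m).map pvAlt := by
  unfold gen_class_py
  rw [PySem.List.pyRange_zero_natCast]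
  induction m with
  | zero => simp
  | succ m ih =>
    rw [List.range_succ]
    simp only [List.map_append, List.foldl_append, List.map_cons, List.map_nil,
      List.foldl_cons, List.foldl_nil]
    rw [ih]
    have hm : PySem.Int.mod (m : Int) 2 = ((m % 2 : Nat) : Int) := by
      exact_mod_cast PySem.Int.mod_natCast m 2
    by_cases h : m % 2 = 0 <;> simp [pvAlt, h] <;> omega

lemma pvFlat (j : Nat) :
    (List.replicate j ([1, 0] : List Int)).flatten = (List.range (2 * j)).map pvAlt := by
  induction j with
  | zero => simp
  | succ j ih =>
    rw [List.replicate_succ', List.flatten_append, ih]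
    have h2 : 2 * (j + 1) = (2 * j) + 1 + 1 := by ring
    rw [h2, List.range_succ, List.range_succ, List.map_append, List.map_append]
    simp [pvAlt, Nat.mul_mod_right]

lemma pvB_closed (m : Nat) :
    gen_class_py_alt (m : Int) = (List.range m).map pvAlt := by
  unfold gen_class_py_alt
  have hfd : (PySem.Int.floordiv ((m : Int) + 1) 2).toNat = (m + 1) / 2 := by
    have h1 : ((m : Int) + 1) = ((m + 1 : Nat) : Int) := by push_cast; ring
    have h2 : ((2 : Nat) : Int) = (2 : Int) := by norm_num
    rw [h1, ← h2, PySem.Int.floordiv_natCast]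
    omega
  rw [hfd, pvFlat, PySem.List.slice_to_natCast, ← List.map_take, List.take_range]
  have hmin : min m (2 * ((m + 1) / 2)) = m := by omega
  rw [hmin]

lemma pvB_neg (n : Int) (hn : n < 0) : gen_class_py_alt n = [] := by
  unfold gen_class_py_alt
  have h1 : PySem.Int.floordiv (n + 1) 2 < 1 := by
    rw [PySem.Int.floordiv_lt_iff_lt_mul (by norm_num)]; omega
  have h0 : (PySem.Int.floordiv (n + 1) 2).toNat = 0 := Int.toNat_of_nonpos (by linarith)
  rw [h0]
  simp [PySem.List.slice]

-- ===== VERDICT (by name: the statement is the Claim_ definition above) =====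
theorem gen_class_py_spec : Claim_equal_gen_class_py := by
  intro n _
  unfold Spec_gen_class_py
  by_cases h : 0 ≤ n
  · obtain ⟨m, rfl⟩ := Int.eq_ofNat_of_zero_le h
    rw [pvA_closed, pvB_closed]
  · rw [not_le] at h
    rw [pvB_neg n h]
    unfold gen_class_py
    rw [PySem.List.pyRange_one]
    have h0 : (n - 0).toNat = 0 := by omega
    simp only [h0, List.range_zero, List.map_nil, List.foldl_nil]
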